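-- pv_equiv track=rewrite | github.com/tsharp/Jarvis | core/task_loop/capability_policy.py | capability_type_from_tools
-- ===== SOURCE A (Python) =====
-- SYSTEM_KNOWLEDGE_TOOLS: frozenset[str] = frozenset({
--     "get_system_info",
--     "get_system_overview",
-- })
--
-- CONTAINER_ACTION_TOOLS: frozenset[str] = frozenset({
--     "request_container",
--     "stop_container",
--     "exec_in_container",
--     "blueprint_create",
--     "home_start",
-- })
--
-- CONTAINER_QUERY_TOOLS: frozenset[str] = frozenset({
--     "blueprint_list",
--     "container_list",
--     "container_inspect",
--     "container_stats",
--     "container_logs",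
-- })
--
-- SKILL_CRON_TOOLS: frozenset[str] = frozenset({
--     "autonomous_skill_task",
--     "create_skill",
--     "run_skill",
--     "list_skills",
--     "get_skill_info",
-- })
--
-- def normalized_tools(suggested_tools: list[str]) -> list[str]:
--     return [
--         str(item or "").strip()
--         for item in suggested_tools or []
--         if str(item or "").strip()
--     ]
--
-- def capability_type_from_tools(suggested_tools: list[str]) -> str:
--     tools = normalized_tools(suggested_tools)
--     if not tools:
--         return ""
--     tool_set = set(tools)
--     if tool_set.intersection(CONTAINER_ACTION_TOOLS | CONTAINER_QUERY_TOOLS):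
--         return "container_manager"
--     if tool_set.intersection(SKILL_CRON_TOOLS):
--         return "skill_cron"
--     if tool_set.intersection(SYSTEM_KNOWLEDGE_TOOLS):
--         return "system_knowledge"
--     if any(tool.startswith("mcp_") for tool in tools):
--         return "mcp"
--     return "tool"
-- ===== SOURCE B (Python) =====
-- CATEGORY_BY_RANK = ("container_manager", "skill_cron", "system_knowledge", "mcp", "tool")
--
-- TOOL_RANK = {
--     "request_container": 0, "stop_container": 0, "exec_in_container": 0,
--     "blueprint_create": 0, "home_start": 0, "blueprint_list": 0,
--     "container_list": 0, "container_inspect": 0, "container_stats": 0,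
--     "container_logs": 0,
--     "autonomous_skill_task": 1, "create_skill": 1, "run_skill": 1,
--     "list_skills": 1, "get_skill_info": 1,
--     "get_system_info": 2, "get_system_overview": 2,
-- }
--
-- def _rank(t):
--     r = TOOL_RANK.get(t)
--     if r is None:
--         r = 3 if t.startswith("mcp_") else 4
--     return r
--
-- def capability_type_from_tools(suggested_tools):
--     best = 5  # 5 = "nothing seen yet"
--     for item in suggested_tools or ():
--         t = str(item or "").strip()
--         if not t:
--             continue
--         r = _rank(t)
--         if r < best:
--             best = r
--     return CATEGORY_BY_RANK[best] if best < 5 else ""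
-- ===== Notes on version B (the rewrite author's own statement) =====
-- stated objective: alternative
-- what changed: Replaces the build-a-set-then-four-intersection-scans branch chain by a single fold over the raw list that normalizes each item inline, maps it to a numeric priority rank via one precomputed tool->rank dict (mcp_ prefix and unknown tools get ranks 3/4), keeps the running minimum rank, and resolves the answer by indexing a fixed label tuple.
import Mathlib
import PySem

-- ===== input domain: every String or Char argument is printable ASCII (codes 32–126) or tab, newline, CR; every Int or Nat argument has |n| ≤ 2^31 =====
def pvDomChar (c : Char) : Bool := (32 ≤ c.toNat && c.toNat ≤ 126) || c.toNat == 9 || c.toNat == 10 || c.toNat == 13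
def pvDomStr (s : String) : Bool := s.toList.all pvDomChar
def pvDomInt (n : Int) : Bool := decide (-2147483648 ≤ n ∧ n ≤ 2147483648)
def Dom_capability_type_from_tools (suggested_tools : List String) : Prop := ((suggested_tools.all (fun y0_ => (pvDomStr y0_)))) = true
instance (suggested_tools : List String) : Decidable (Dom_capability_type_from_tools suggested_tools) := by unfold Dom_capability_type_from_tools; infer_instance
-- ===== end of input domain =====

-- B replaces A's set-building and repeated intersection scans by one fold that keeps the
-- minimum priority rank of the normalized tools (alternative decomposition, same cost class).

-- ===== PORT A =====
def SYSTEM_KNOWLEDGE_TOOLS : PySem.Set String :=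
  PySem.Set.ofList ["get_system_info", "get_system_overview"]

def CONTAINER_ACTION_TOOLS : PySem.Set String :=
  PySem.Set.ofList ["request_container", "stop_container", "exec_in_container",
    "blueprint_create", "home_start"]

def CONTAINER_QUERY_TOOLS : PySem.Set String :=
  PySem.Set.ofList ["blueprint_list", "container_list", "container_inspect",
    "container_stats", "container_logs"]

def SKILL_CRON_TOOLS : PySem.Set String :=
  PySem.Set.ofList ["autonomous_skill_task", "create_skill", "run_skill",
    "list_skills", "get_skill_info"]

-- [str(item or "").strip() for item in suggested_tools or [] if str(item or "").strip()]
-- (items are already str, so str(item or "") is the item itself; 'suggested_tools or []' iterates the same elements)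
def normalized_tools (suggested_tools : List String) : List String :=
  (suggested_tools.map (fun item => PySem.Str.strip item)).filter (fun t => t != "")

def capability_type_from_tools (suggested_tools : List String) : String :=
  let tools := normalized_tools suggested_tools
  if tools = [] then ""
  else
    let tool_set := PySem.Set.ofList tools
    -- Python set truthiness: a nonempty intersection
    if PySem.Set.inter tool_set (PySem.Set.union CONTAINER_ACTION_TOOLS CONTAINER_QUERY_TOOLS) ≠ [] then
      "container_manager"
    else if PySem.Set.inter tool_set SKILL_CRON_TOOLS ≠ [] then
      "skill_cron"
    else if PySem.Set.inter tool_set SYSTEM_KNOWLEDGE_TOOLS ≠ [] then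
      "system_knowledge"
    else if tools.any (fun tool => PySem.Str.startswith tool "mcp_") then
      "mcp"
    else
      "tool"

-- ===== PORT B =====
def CATEGORY_BY_RANK : List String :=
  ["container_manager", "skill_cron", "system_knowledge", "mcp", "tool"]

-- Python dict literal with distinct keys = this association list in insertion order
def TOOL_RANK : PySem.Dict String Int := PySem.Dict.mk
  [("request_container", 0), ("stop_container", 0), ("exec_in_container", 0),
   ("blueprint_create", 0), ("home_start", 0), ("blueprint_list", 0),
   ("container_list", 0), ("container_inspect", 0), ("container_stats", 0),
   ("container_logs", 0),
   ("autonomous_skill_task", 1), ("create_skill", 1), ("run_skill", 1),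
   ("list_skills", 1), ("get_skill_info", 1),
   ("get_system_info", 2), ("get_system_overview", 2)]

def ctfRank (t : String) : Int :=
  match PySem.Dict.get? TOOL_RANK t with
  | some r => r
  | none => if PySem.Str.startswith t "mcp_" then 3 else 4

def ctfStep (best : Int) (item : String) : Int :=
  let t := PySem.Str.strip item
  if t = "" then best
  else
    let r := ctfRank t
    if r < best then r else best

def capability_type_from_tools_alt (suggested_tools : List String) : String :=
  let best := suggested_tools.foldl ctfStep 5
  -- CATEGORY_BY_RANK[best]: exact here since the loop keeps 0 ≤ best, and best < 5 is checked
  if best < 5 then (PySem.List.pyGet? CATEGORY_BY_RANK best).getD "" else ""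

-- ===== PRECONDITION & SPEC =====
def Spec_capability_type_from_tools (suggested_tools : List String) (out : String) : Prop := out = capability_type_from_tools_alt suggested_tools
instance (suggested_tools : List String) (out : String) : Decidable (Spec_capability_type_from_tools suggested_tools out) := by unfold Spec_capability_type_from_tools; infer_instance

-- ===== CLAIM (what is proved, stated in full; the proofs are below) =====
def Claim_equal_capability_type_from_tools : Prop := ∀ (suggested_tools : List String), Dom_capability_type_from_tools suggested_tools → Spec_capability_type_from_tools suggested_tools (capability_type_from_tools suggested_tools)

-- ===== LEMMAS AND PROOFS =====

-- literal contents of A's membership tests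
def ctfL0 : List String :=
  ["request_container", "stop_container", "exec_in_container", "blueprint_create",
   "home_start", "blueprint_list", "container_list", "container_inspect",
   "container_stats", "container_logs"]
def ctfL1 : List String :=
  ["autonomous_skill_task", "create_skill", "run_skill", "list_skills", "get_skill_info"]
def ctfL2 : List String := ["get_system_info", "get_system_overview"]

theorem ctf_union_eq :
    PySem.Set.union CONTAINER_ACTION_TOOLS CONTAINER_QUERY_TOOLS = ctfL0 := by decide

theorem ctf_skill_eq : SKILL_CRON_TOOLS = ctfL1 := by decide
theorem ctf_sys_eq : SYSTEM_KNOWLEDGE_TOOLS = ctfL2 := by decide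

theorem ctf_inter_ne_nil (tools u : List String) :
    (PySem.Set.inter (PySem.Set.ofList tools) u ≠ []) ↔ ∃ t ∈ tools, t ∈ u := by
  rw [Ne, PySem.Set.inter, List.filter_eq_nil_iff]
  push_neg
  simp [PySem.Set.mem_ofList]

theorem ctf_get (t : String) :
    PySem.Dict.get? TOOL_RANK t =
      if t ∈ ctfL0 then some 0 else if t ∈ ctfL1 then some 1 else if t ∈ ctfL2 then some 2
      else none := by
  by_cases h0 : t ∈ ctfL0
  · rw [if_pos h0]; fin_cases h0 <;> decide
  · rw [if_neg h0]
    by_cases h1 : t ∈ ctfL1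
    · rw [if_pos h1]; fin_cases h1 <;> decide
    · rw [if_neg h1]
      by_cases h2 : t ∈ ctfL2
      · rw [if_pos h2]; fin_cases h2 <;> decide
      · rw [if_neg h2]
        simp only [ctfL0, List.mem_cons, List.not_mem_nil, or_false, not_or] at h0
        simp only [ctfL1, List.mem_cons, List.not_mem_nil, or_false, not_or] at h1
        simp only [ctfL2, List.mem_cons, List.not_mem_nil, or_false, not_or] at h2
        obtain ⟨a1,a2,a3,a4,a5,a6,a7,a8,a9,a10⟩ := h0
        obtain ⟨b1,b2,b3,b4,b5⟩ := h1
        obtain ⟨c1,c2⟩ := h2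
        simp [TOOL_RANK, PySem.Dict.get?, PySem.Dict.get?_mk_cons,
          Ne.symm a1, Ne.symm a2, Ne.symm a3, Ne.symm a4, Ne.symm a5,
          Ne.symm a6, Ne.symm a7, Ne.symm a8, Ne.symm a9, Ne.symm a10,
          Ne.symm b1, Ne.symm b2, Ne.symm b3, Ne.symm b4, Ne.symm b5,
          Ne.symm c1, Ne.symm c2]

theorem ctf_rank_eq (t : String) :
    ctfRank t =
      if t ∈ ctfL0 then 0 else if t ∈ ctfL1 then 1 else if t ∈ ctfL2 then 2
      else if PySem.Str.startswith t "mcp_" then 3 else 4 := by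
  unfold ctfRank
  rw [ctf_get]
  split_ifs <;> rfl

theorem ctf_rank_nonneg (t : String) : 0 ≤ ctfRank t := by
  rw [ctf_rank_eq]; split_ifs <;> norm_num

theorem ctf_fold_eq (xs : List String) (b : Int) :
    xs.foldl ctfStep b =
      (normalized_tools xs).foldl (fun best t => if ctfRank t < best then ctfRank t else best) b := by
  induction xs generalizing b with
  | nil => rfl
  | cons x xs ih =>
    simp only [normalized_tools, List.map_cons, List.filter_cons, List.foldl_cons]
    by_cases hx : PySem.Str.strip x = ""
    · simp [ctfStep, hx, ih, normalized_tools]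
    · simp only [hx, bne_iff_ne, ne_eq, not_false_eq_true, if_pos, List.foldl_cons]
      rw [ih]
      simp [ctfStep, hx, normalized_tools]

theorem ctf_fold_ge (l : List String) (b c : Int) (hb : c ≤ b)
    (h : ∀ t ∈ l, c ≤ ctfRank t) :
    c ≤ l.foldl (fun best t => if ctfRank t < best then ctfRank t else best) b := by
  induction l generalizing b with
  | nil => exact hb
  | cons x xs ih =>
    simp only [List.foldl_cons]
    apply ih
    · split_ifs with hr
      · exact h x (by simp)
      · exact hb
    · exact fun t ht => h t (by simp [ht])

theorem ctf_fold_le_init (l : List String) (b : Int) :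
    l.foldl (fun best t => if ctfRank t < best then ctfRank t else best) b ≤ b := by
  induction l generalizing b with
  | nil => simp
  | cons x xs ih =>
    simp only [List.foldl_cons]
    refine le_trans (ih _) ?_
    split_ifs with hr
    · omega
    · omega

theorem ctf_fold_le_mem (l : List String) (b : Int) (t : String) (ht : t ∈ l) :
    l.foldl (fun best t => if ctfRank t < best then ctfRank t else best) b ≤ ctfRank t := by
  induction l generalizing b with
  | nil => cases ht
  | cons x xs ih =>
    simp only [List.foldl_cons]
    rcases List.mem_cons.mp ht with h | h
    · subst h
      refine le_trans (ctf_fold_le_init _ _) ?_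
      split_ifs with hr <;> omega
    · exact ih _ h

-- ===== VERDICT (by name: the statement is the Claim_ definition above) =====
theorem capability_type_from_tools_spec : Claim_equal_capability_type_from_tools := by
  intro xs _
  unfold Spec_capability_type_from_tools capability_type_from_tools capability_type_from_tools_alt
  rw [ctf_fold_eq]
  set tools := normalized_tools xs with htools
  by_cases hnil : tools = []
  · simp [hnil]
  · rw [if_neg hnil]
    set best := tools.foldl (fun best t => if ctfRank t < best then ctfRank t else best) 5 with hbest
    rw [ctf_union_eq, ctf_skill_eq, ctf_sys_eq]
    by_cases h0 : ∃ t ∈ tools, t ∈ ctfL0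
    · rw [if_pos ((ctf_inter_ne_nil tools ctfL0).mpr h0)]
      obtain ⟨t, ht, ht0⟩ := h0
      have hle : best ≤ 0 := by
        have := ctf_fold_le_mem tools 5 t ht
        rw [ctf_rank_eq, if_pos ht0] at this; omega
      have hge : 0 ≤ best :=
        ctf_fold_ge tools 5 0 (by norm_num) (fun t _ => ctf_rank_nonneg t)
      have : best = 0 := le_antisymm hle hge
      rw [this]; decide
    · rw [if_neg (fun hc => h0 ((ctf_inter_ne_nil tools ctfL0).mp hc))]
      push_neg at h0
      by_cases h1 : ∃ t ∈ tools, t ∈ ctfL1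
      · rw [if_pos ((ctf_inter_ne_nil tools ctfL1).mpr h1)]
        obtain ⟨t, ht, ht1⟩ := h1
        have hle : best ≤ 1 := by
          have := ctf_fold_le_mem tools 5 t ht
          rw [ctf_rank_eq, if_neg (h0 t ht), if_pos ht1] at this; omega
        have hge : 1 ≤ best := by
          refine ctf_fold_ge tools 5 1 (by norm_num) (fun u hu => ?_)
          rw [ctf_rank_eq, if_neg (h0 u hu)]
          split_ifs <;> norm_num
        have : best = 1 := le_antisymm hle hge
        rw [this]; decide
      · rw [if_neg (fun hc => h1 ((ctf_inter_ne_nil tools ctfL1).mp hc))]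
        push_neg at h1
        by_cases h2 : ∃ t ∈ tools, t ∈ ctfL2
        · rw [if_pos ((ctf_inter_ne_nil tools ctfL2).mpr h2)]
          obtain ⟨t, ht, ht2⟩ := h2
          have hle : best ≤ 2 := by
            have := ctf_fold_le_mem tools 5 t ht
            rw [ctf_rank_eq, if_neg (h0 t ht), if_neg (h1 t ht), if_pos ht2] at this; omega
          have hge : 2 ≤ best := by
            refine ctf_fold_ge tools 5 2 (by norm_num) (fun u hu => ?_)
            rw [ctf_rank_eq, if_neg (h0 u hu), if_neg (h1 u hu)]
            split_ifs <;> norm_num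
          have : best = 2 := le_antisymm hle hge
          rw [this]; decide
        · rw [if_neg (fun hc => h2 ((ctf_inter_ne_nil tools ctfL2).mp hc))]
          push_neg at h2
          have hrank : ∀ u ∈ tools, ctfRank u =
              if PySem.Str.startswith u "mcp_" then 3 else 4 := by
            intro u hu
            rw [ctf_rank_eq, if_neg (h0 u hu), if_neg (h1 u hu), if_neg (h2 u hu)]
          by_cases hm : ∃ t ∈ tools, PySem.Str.startswith t "mcp_" = true
          · rw [if_pos (by rw [List.any_eq_true]; exact hm)]
            obtain ⟨t, ht, htm⟩ := hm
            have hle : best ≤ 3 := by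
              have := ctf_fold_le_mem tools 5 t ht
              rw [hrank t ht, if_pos htm] at this; omega
            have hge : 3 ≤ best := by
              refine ctf_fold_ge tools 5 3 (by norm_num) (fun u hu => ?_)
              rw [hrank u hu]; split_ifs <;> norm_num
            have : best = 3 := le_antisymm hle hge
            rw [this]; decide
          · rw [if_neg (by rw [List.any_eq_true]; exact hm)]
            push_neg at hm
            have hrank4 : ∀ u ∈ tools, ctfRank u = 4 := by
              intro u hu
              rw [hrank u hu, if_neg (by simpa using hm u hu)]
            obtain ⟨t, ht⟩ := List.exists_mem_of_ne_nil tools hnil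
            have hle : best ≤ 4 := by
              have := ctf_fold_le_mem tools 5 t ht
              rw [hrank4 t ht] at this; omega
            have hge : 4 ≤ best := by
              refine ctf_fold_ge tools 5 4 (by norm_num) (fun u hu => ?_)
              rw [hrank4 u hu]
            have : best = 4 := le_antisymm hle hge
            rw [this]; decide
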